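-- pv_equiv track=rewrite | github.com/FEUE256/Number-Checker | fib1.py | find_prime_index
-- ===== SOURCE A (Python) =====
-- from math import isqrt
--
-- def is_prime(n):
--     if n < 2:
--         return False
--     if n == 2 or n == 3:
--         return True
--     if n % 2 == 0:
--         return False
--     r = isqrt(n)
--     for i in range(3, r+1, 2):
--         if n % i == 0:
--             return False
--     return True
--
-- def find_prime_index(n):
--     if not is_prime(n):
--         return None
--     count = 0
--     candidate = 2
--     while candidate <= n:
--         if is_prime(candidate):
--             count += 1
--         if candidate == n:
--             return count
--         candidate += 1
--     return None
-- ===== SOURCE B (Python) =====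
-- from math import isqrt
--
-- def find_prime_index(n):
--     # quick compositeness check, then count primes <= n with an incremental
--     # prime list: each k is tested only against the primes found so far
--     # whose square does not exceed k.
--     if n < 2 or any(n % d == 0 for d in range(2, isqrt(n) + 1)):
--         return None
--     primes = []
--     for k in range(2, n + 1):
--         is_p = True
--         for p in primes:
--             if p * p > k:
--                 break
--             if k % p == 0:
--                 is_p = False
--                 break
--         if is_p:
--             primes.append(k)
--     return len(primes)
-- ===== Notes on version B (the rewrite author's own statement) =====
-- stated objective: alternative
-- what changed: A tests every candidate 2..n independently by trial division over all odd numbers up to its square root; B keeps one growing list of the primes found so far and tests each candidate only against stored primes whose square does not exceed it (after a direct root-bounded compositeness check on n), doing fewer divisions per candidate.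
import Mathlib
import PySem

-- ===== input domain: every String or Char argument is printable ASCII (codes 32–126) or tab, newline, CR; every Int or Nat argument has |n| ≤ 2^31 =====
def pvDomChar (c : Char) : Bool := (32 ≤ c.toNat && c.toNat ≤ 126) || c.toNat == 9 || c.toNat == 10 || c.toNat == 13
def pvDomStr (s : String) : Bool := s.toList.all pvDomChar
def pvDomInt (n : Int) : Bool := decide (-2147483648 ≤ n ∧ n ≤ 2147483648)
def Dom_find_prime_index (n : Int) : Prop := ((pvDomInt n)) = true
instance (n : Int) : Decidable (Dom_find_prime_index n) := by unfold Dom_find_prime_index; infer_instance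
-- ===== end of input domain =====

-- B replaces A's per-candidate odd-step trial division with an incremental prime list
-- (each candidate tested only against stored primes up to its square root): a different counting algorithm.


-- ===== PORT A =====
-- math.isqrt; exact for 0 ≤ n (both programs only call it on nonnegative arguments)
def pyIsqrt (n : Int) : Int := ((Nat.sqrt n.toNat : Nat) : Int)

-- the 'for i in range(3, r+1, 2): if n % i == 0: return False' loop of is_prime
def aTrial (n : Int) : Bool :=
  (PySem.List.pyRange 3 (pyIsqrt n + 1) 2).all (fun i => !(PySem.Int.mod n i == 0))

def is_prime (n : Int) : Bool :=
  if n < 2 then false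
  else if n == 2 || n == 3 then true
  else if PySem.Int.mod n 2 == 0 then false
  else aTrial n

-- the 'while candidate <= n' loop of A
def aLoop (n count candidate : Int) : Option Int :=
  if _h : candidate ≤ n then
    let count' := if is_prime candidate then count + 1 else count
    if candidate == n then some count'
    else aLoop n count' (candidate + 1)
  else none
termination_by (n + 1 - candidate).toNat
decreasing_by omega

def find_prime_index (n : Int) : Option Int :=
  if !is_prime n then none else aLoop n 0 2

-- ===== PORT B =====
-- the inner 'for p in primes' loop of B with its two breaks
def bInner (k : Int) : List Int → Bool
  | [] => true
  | p :: rest =>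
    if p * p > k then true
    else if PySem.Int.mod k p == 0 then false
    else bInner k rest

-- the 'for k in range(2, n+1)' loop of B, accumulating the prime list
def bLoop (n k : Int) (primes : List Int) : List Int :=
  if _h : k ≤ n then
    bLoop n (k + 1) (if bInner k primes then primes ++ [k] else primes)
  else primes
termination_by (n + 1 - k).toNat
decreasing_by omega

-- 'any(n % d == 0 for d in range(2, isqrt(n) + 1))'
def bHasDiv (n : Int) : Bool :=
  (PySem.List.pyRange 2 (pyIsqrt n + 1) 1).any (fun d => PySem.Int.mod n d == 0)

def find_prime_index_alt (n : Int) : Option Int :=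
  if n < 2 || bHasDiv n then none
  else some ((bLoop n 2 []).length : Int)

-- ===== PRECONDITION & SPEC =====
def Spec_find_prime_index (n : Int) (out : Option Int) : Prop := out = find_prime_index_alt n
instance (n : Int) (out : Option Int) : Decidable (Spec_find_prime_index n out) := by unfold Spec_find_prime_index; infer_instance

-- ===== CLAIM (what is proved, stated in full; the proofs are below) =====
def Claim_equal_find_prime_index : Prop := ∀ (n : Int), Dom_find_prime_index n → Spec_find_prime_index n (find_prime_index n)

-- ===== LEMMAS AND PROOFS =====

-- the mathematical primality predicate both ports are related to
def IPrime (m : Int) : Prop := 2 ≤ m ∧ Nat.Prime m.toNat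

-- dvd transfer: for 0 ≤ m, (d : ℕ) divides m.toNat iff (d : ℤ) divides m
theorem dvd_toNat_iff (d : Nat) (m : Int) (hm : 0 ≤ m) : (d ∣ m.toNat) ↔ ((d : Int) ∣ m) := by
  rw [← Int.natCast_dvd_natCast, Int.toNat_of_nonneg hm]

-- no divisor in [2, sqrt m] ↔ prime, for m ≥ 2
theorem no_small_div_iff_prime (m : Int) (hm : 2 ≤ m) :
    (∀ d : Int, 2 ≤ d → d ≤ (Nat.sqrt m.toNat : Int) → ¬ d ∣ m) ↔ Nat.Prime m.toNat := by
  constructor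
  · intro h
    rw [Nat.prime_def_le_sqrt]
    refine ⟨by omega, fun d hd2 hdsq hdvd => ?_⟩
    exact h (d : Int) (by exact_mod_cast hd2) (by exact_mod_cast hdsq)
      ((dvd_toNat_iff d m (by omega)).mp hdvd)
  · intro hp d hd2 hdsq hdvd
    have h2 : 2 ≤ d.toNat := by omega
    have hsq : d.toNat ≤ Nat.sqrt m.toNat := by omega
    have : d.toNat ∣ m.toNat := (dvd_toNat_iff d.toNat m (by omega)).mpr (by
      rwa [Int.toNat_of_nonneg (by omega : (0:Int) ≤ d)])
    exact (Nat.prime_def_le_sqrt.mp hp).2 d.toNat h2 hsq this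

-- A's is_prime agrees with IPrime
theorem is_prime_iff (m : Int) : is_prime m = true ↔ IPrime m := by
  unfold is_prime IPrime
  by_cases h2 : m < 2
  · simp [h2]
  · by_cases h23 : m = 2 ∨ m = 3
    · rcases h23 with rfl | rfl <;> decide
    · have hm4 : 4 ≤ m := by omega
      have hne : ¬(m == 2 || m == 3) = true := by
        simp only [Bool.or_eq_true, beq_iff_eq]; tauto
      by_cases heven : (2:Int) ∣ m
      · have : PySem.Int.mod m 2 = 0 := (PySem.Int.mod_eq_zero_iff_dvd m 2).mpr heven
        simp only [if_neg h2, if_neg hne, this]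
        simp only [beq_self_eq_true, if_true]
        constructor
        · intro h; exact absurd h (by simp)
        · rintro ⟨-, hp⟩
          have h2d : 2 ∣ m.toNat := (dvd_toNat_iff 2 m (by omega)).mpr heven
          rcases (Nat.Prime.eq_one_or_self_of_dvd hp 2 h2d) with h | h <;> omega
      · have hmod : ¬(PySem.Int.mod m 2 == 0) = true := by
          simp only [beq_iff_eq, PySem.Int.mod_eq_zero_iff_dvd]; exact heven
        simp only [if_neg h2, if_neg hne, if_neg hmod]
        unfold aTrial
        rw [List.all_eq_true]
        constructor
        · intro h
          refine ⟨by omega, (no_small_div_iff_prime m (by omega)).mp ?_⟩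
          intro d hd2 hdsq hdvd
          by_cases hde : (2:Int) ∣ d
          · exact heven (dvd_trans hde hdvd)
          · have hd3 : 3 ≤ d := by omega
            have hmem : d ∈ PySem.List.pyRange 3 (pyIsqrt m + 1) 2 := by
              rw [PySem.List.mem_pyRange_iff_of_pos (by norm_num)]
              refine ⟨hd3, ?_, ?_⟩
              · unfold pyIsqrt; omega
              · omega
            have := h d hmem
            simp only [Bool.not_eq_true', beq_eq_false_iff_ne, ne_eq] at this
            exact this ((PySem.Int.mod_eq_zero_iff_dvd m d).mpr hdvd)
        · rintro ⟨-, hp⟩ i hi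
          rw [PySem.List.mem_pyRange_iff_of_pos (by norm_num)] at hi
          obtain ⟨hi3, hilt, -⟩ := hi
          simp only [Bool.not_eq_true', beq_eq_false_iff_ne, ne_eq,
            PySem.Int.mod_eq_zero_iff_dvd]
          intro hdvd
          exact (no_small_div_iff_prime m (by omega)).mpr hp i (by omega)
            (by unfold pyIsqrt at hilt; omega) hdvd

-- count of is_prime-positives in [a, b] as produced by A's while loop
def aLoop_spec_cnt (a b : Int) : Int :=
  (((PySem.List.pyRange a (b + 1) 1).filter (fun m => is_prime m)).length : Int)

theorem aLoop_eq (n : Int) : ∀ (fuel : Nat) (c cand : Int), (n + 1 - cand).toNat = fuel →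
    cand ≤ n → aLoop n c cand = some (c + aLoop_spec_cnt cand n) := by
  intro fuel
  induction fuel with
  | zero => intro c cand hf hle; omega
  | succ f ih =>
    intro c cand hf hle
    rw [aLoop]
    simp only [dif_pos hle]
    by_cases heq : cand = n
    · subst heq
      simp only [beq_self_eq_true, if_true]
      unfold aLoop_spec_cnt
      rw [PySem.List.pyRange_one_cons (by omega), PySem.List.pyRange_one_eq_nil (by omega)]
      by_cases hp : is_prime cand <;> simp [hp]
    · have hne : ¬(cand == n) = true := by simpa using heq
      rw [if_neg hne, ih _ (cand + 1) (by omega) (by omega)]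
      congr 1
      unfold aLoop_spec_cnt
      rw [PySem.List.pyRange_one_cons (by omega : cand < n + 1)]
      by_cases hp : is_prime cand <;> (simp [hp]; try omega)

-- ===== B-side lemmas =====

-- the prime list B has accumulated just before processing k
def primesUpto (k : Int) : List Int :=
  (PySem.List.pyRange 2 k 1).filter (fun m => decide (2 ≤ m ∧ Nat.Prime m.toNat))

theorem primesUpto_sorted (k : Int) : (primesUpto k).Pairwise (· < ·) :=
  List.Pairwise.sublist (List.filter_sublist) (PySem.List.pairwise_lt_pyRange_one 2 k)

theorem primesUpto_mem (k p : Int) (hp : p ∈ primesUpto k) : IPrime p ∧ 2 ≤ p ∧ p < k := by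
  unfold primesUpto at hp
  rw [List.mem_filter] at hp
  obtain ⟨hmem, hdec⟩ := hp
  rw [PySem.List.mem_pyRange_one] at hmem
  have hp' : 2 ≤ p ∧ Nat.Prime p.toNat := by simpa using hdec
  exact ⟨hp', hmem.1, hmem.2⟩

theorem primesUpto_complete (k p : Int) (h2 : 2 ≤ p) (hk : p < k) (hp : IPrime p) :
    p ∈ primesUpto k := by
  unfold primesUpto
  rw [List.mem_filter, PySem.List.mem_pyRange_one]
  exact ⟨⟨h2, hk⟩, by simp only [decide_eq_true_eq]; exact hp⟩

-- bInner on a sorted list of values ≥ 2 checks exactly the elements with p*p ≤ k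
theorem bInner_eq_true_iff (k : Int) (ps : List Int) (hs : ps.Pairwise (· < ·))
    (h2 : ∀ p ∈ ps, 2 ≤ p) :
    bInner k ps = true ↔ ∀ p ∈ ps, p * p ≤ k → ¬ p ∣ k := by
  induction ps with
  | nil =>
    rw [show bInner k [] = true from rfl]
    simp
  | cons p rest ih =>
    rw [List.pairwise_cons] at hs
    obtain ⟨hlt, hrest⟩ := hs
    by_cases hgt : p * p > k
    · rw [bInner, if_pos hgt]
      simp only [true_iff, List.mem_cons]
      rintro q (rfl | hq) hle
      · omega
      · have : p < q := hlt q hq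
        have hp2 : 2 ≤ p := h2 p (List.mem_cons_self)
        nlinarith
    · rw [bInner, if_neg hgt]
      by_cases hdvd : p ∣ k
      · rw [if_pos (by simpa [PySem.Int.mod_eq_zero_iff_dvd] using hdvd)]
        constructor
        · intro hfalse; exact (Bool.false_ne_true hfalse).elim
        · intro h; exact absurd hdvd (h p List.mem_cons_self (not_lt.mp hgt))
      · rw [if_neg (by simpa [PySem.Int.mod_eq_zero_iff_dvd] using hdvd)]
        rw [ih hrest (fun q hq => h2 q (List.mem_cons_of_mem _ hq))]
        constructor
        · intro h q hq hle
          rcases List.mem_cons.mp hq with rfl | hq'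
          · exact hdvd
          · exact h q hq' hle
        · intro h q hq hle; exact h q (List.mem_cons_of_mem _ hq) hle

-- bInner over the accumulated prime list is exactly primality of k
theorem bInner_primesUpto (k : Int) (hk : 2 ≤ k) :
    bInner k (primesUpto k) = true ↔ Nat.Prime k.toNat := by
  rw [bInner_eq_true_iff k (primesUpto k) (primesUpto_sorted k)
    (fun p hp => (primesUpto_mem k p hp).2.1)]
  constructor
  · intro h
    by_contra hnp
    have hminfac := Nat.minFac_dvd k.toNat
    have hminp : Nat.Prime (k.toNat.minFac) := Nat.minFac_prime (by omega)
    have hsq : k.toNat.minFac * k.toNat.minFac ≤ k.toNat := by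
      have := Nat.minFac_sq_le_self (by omega) hnp
      rwa [pow_two] at this
    have hq2 : (2 : Int) ≤ (k.toNat.minFac : Int) := by exact_mod_cast hminp.two_le
    have hlt : k.toNat.minFac < k.toNat := by nlinarith [hminp.two_le]
    have hqk : (k.toNat.minFac : Int) < k := by omega
    have hqq : (k.toNat.minFac : Int) * (k.toNat.minFac : Int) ≤ k := by
      have h1 : ((k.toNat.minFac * k.toNat.minFac : Nat) : Int) ≤ ((k.toNat : Nat) : Int) := by
        exact_mod_cast hsq
      push_cast at h1
      have h2 : ((k.toNat : Nat) : Int) = k := Int.toNat_of_nonneg (by omega)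
      linarith [h1, h2.le, h2.ge]
    have hqdvd : (k.toNat.minFac : Int) ∣ k := (dvd_toNat_iff k.toNat.minFac k (by omega)).mp hminfac
    have hmem : (k.toNat.minFac : Int) ∈ primesUpto k := primesUpto_complete k _ hq2 hqk
      ⟨hq2, by simpa using hminp⟩
    exact h _ hmem hqq hqdvd
  · intro hp p hmem _hle hdvd
    obtain ⟨⟨-, hpp⟩, hp2, hpk⟩ := primesUpto_mem k p hmem
    have : p.toNat ∣ k.toNat := (dvd_toNat_iff p.toNat k (by omega)).mpr
      (by rwa [Int.toNat_of_nonneg (by omega : (0:Int) ≤ p)])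
    rcases (hp.eq_one_or_self_of_dvd p.toNat this) with h | h <;> omega

-- B's main loop turns primesUpto k into primesUpto (n+1)
theorem bLoop_eq (n : Int) : ∀ (fuel : Nat) (k : Int), (n + 1 - k).toNat = fuel →
    2 ≤ k → bLoop n k (primesUpto k) = primesUpto (max k (n + 1)) := by
  intro fuel
  induction fuel with
  | zero =>
    intro k hf hk2
    rw [bLoop]
    have : ¬ k ≤ n := by omega
    rw [dif_neg this]
    congr 1; omega
  | succ f ih =>
    intro k hf hk2
    rw [bLoop]
    have hle : k ≤ n := by omega
    rw [dif_pos hle]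
    have hstep : (if bInner k (primesUpto k) then primesUpto k ++ [k] else primesUpto k)
        = primesUpto (k + 1) := by
      have hbi := bInner_primesUpto k hk2
      by_cases hp : Nat.Prime k.toNat
      · rw [if_pos (hbi.mpr hp)]
        unfold primesUpto
        rw [PySem.List.pyRange_one_succ_right (by omega : (2:Int) ≤ k), List.filter_append]
        simp [hk2, hp]
      · rw [if_neg (fun hc => hp (hbi.mp hc))]
        unfold primesUpto
        rw [PySem.List.pyRange_one_succ_right (by omega : (2:Int) ≤ k), List.filter_append]
        simp [hp]
    rw [hstep, ih (k + 1) (by omega) (by omega)]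
    congr 1; omega

-- bHasDiv is exactly compositeness, for n ≥ 2
theorem bHasDiv_iff (n : Int) (hn : 2 ≤ n) : bHasDiv n = true ↔ ¬ Nat.Prime n.toNat := by
  unfold bHasDiv
  rw [List.any_eq_true]
  rw [← no_small_div_iff_prime n hn]
  constructor
  · rintro ⟨d, hmem, hdvd⟩ h
    rw [PySem.List.mem_pyRange_one] at hmem
    simp only [beq_iff_eq, PySem.Int.mod_eq_zero_iff_dvd] at hdvd
    exact h d hmem.1 (by unfold pyIsqrt at hmem; omega) hdvd
  · intro h
    rw [not_forall] at h
    obtain ⟨d, hd⟩ := h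
    simp only [not_forall, not_not] at hd
    obtain ⟨hd2, hdsq, hdvd⟩ := hd
    refine ⟨d, ?_, by simpa [PySem.Int.mod_eq_zero_iff_dvd] using hdvd⟩
    rw [PySem.List.mem_pyRange_one]
    exact ⟨hd2, by unfold pyIsqrt; omega⟩

-- the two counts agree: A filters by is_prime, B by (decidable) IPrime
theorem counts_agree (n : Int) :
    aLoop_spec_cnt 2 n = ((primesUpto (n + 1)).length : Int) := by
  unfold aLoop_spec_cnt primesUpto
  congr 2
  apply List.filter_congr
  intro m _hm
  by_cases h : 2 ≤ m ∧ Nat.Prime m.toNat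
  · simp [(is_prime_iff m).mpr h, h.1, h.2]
  · have hni : ¬ is_prime m = true := fun hc => h ((is_prime_iff m).mp hc)
    simp [h, hni]

-- ===== VERDICT (by name: the statement is the Claim_ definition above) =====
theorem find_prime_index_spec : Claim_equal_find_prime_index := by
  intro n _hdom
  unfold Spec_find_prime_index find_prime_index find_prime_index_alt
  by_cases hn2 : n < 2
  · have hnp : ¬ is_prime n = true := by
      intro h; exact absurd ((is_prime_iff n).mp h).1 (by omega)
    simp [hnp, hn2]
  · have hn2' : 2 ≤ n := by omega
    by_cases hp : Nat.Prime n.toNat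
    · have hip : is_prime n = true := (is_prime_iff n).mpr ⟨hn2', hp⟩
      have hbd : ¬ bHasDiv n = true := fun h => (bHasDiv_iff n hn2').mp h hp
      rw [if_neg (by simp [hip]), if_neg (by simp [hbd]; omega)]
      rw [aLoop_eq n (n + 1 - 2).toNat 0 2 rfl hn2']
      have hb : bLoop n 2 [] = primesUpto (n + 1) := by
        have h0 : primesUpto 2 = [] := by
          unfold primesUpto
          rw [PySem.List.pyRange_one_eq_nil (by omega)]; rfl
        have := bLoop_eq n (n + 1 - 2).toNat 2 rfl (by omega)
        rw [h0] at this
        rw [this]; congr 1; omega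
      rw [hb, counts_agree n]
      simp
    · have hip : ¬ is_prime n = true := fun h => hp ((is_prime_iff n).mp h).2
      have hbd : bHasDiv n = true := (bHasDiv_iff n hn2').mpr hp
      simp [hip, hbd]
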